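-- pv_equiv track=rewrite | github.com/Antoine-D/Python-Poker-Player | poker.py | get_card_distribution
-- ===== SOURCE A (Python) =====
-- def get_card_distribution(hand_cards):
--     card_distribution = list()
--
--     # for each card in the hand, add it to the distribution
--     for card in hand_cards:
--         placed_in_dist = False
--
--         for value_tally in card_distribution:
--             # if the card's value is already in the hand, add this
--             # cards suit to the distribution list under that value
--             if value_tally[0] == card[0]:
--                 value_tally[1].append(card[1])
--                 placed_in_dist = True
--
--         # if the value didn't already exist in the distribution
--         # then add it
--         if not placed_in_dist:
--             this_val_tally = [card[0], list()]
--             this_val_tally[1].append(card[1])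
--             card_distribution.append(this_val_tally)
--
--     return sorted(card_distribution)
-- ===== SOURCE B (Python) =====
-- def get_card_distribution(hand_cards):
--     # Selection-style recursion: peel off the smallest card value with its
--     # suits (in encounter order), recurse on the remaining cards.
--     if not hand_cards:
--         return []
--     v = min(card[0] for card in hand_cards)
--     suits = [card[1] for card in hand_cards if card[0] == v]
--     rest = [card for card in hand_cards if card[0] != v]
--     return [[v, suits]] + get_card_distribution(rest)
-- ===== Notes on version B (the rewrite author's own statement) =====
-- stated objective: alternative
-- what changed: A accumulates groups by scanning the growing distribution list per card and then sorts; B is a selection-style recursion: it repeatedly extracts the minimum card value, collects that value's suits by one filter pass, and recurses on the remaining cards, so the output is emitted directly in sorted order with no accumulator and no final sort.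
import Mathlib
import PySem

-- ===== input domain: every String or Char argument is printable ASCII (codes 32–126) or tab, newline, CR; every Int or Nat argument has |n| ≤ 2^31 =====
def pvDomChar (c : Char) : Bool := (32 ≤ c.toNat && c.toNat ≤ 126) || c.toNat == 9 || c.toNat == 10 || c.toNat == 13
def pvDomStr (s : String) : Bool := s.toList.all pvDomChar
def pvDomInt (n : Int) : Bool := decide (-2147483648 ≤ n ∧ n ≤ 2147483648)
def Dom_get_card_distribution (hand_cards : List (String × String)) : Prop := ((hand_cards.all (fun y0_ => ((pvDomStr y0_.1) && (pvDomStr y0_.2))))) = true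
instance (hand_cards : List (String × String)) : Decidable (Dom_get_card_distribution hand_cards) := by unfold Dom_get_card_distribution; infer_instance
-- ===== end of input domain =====

-- B is an alternative algorithm: selection-style recursion that repeatedly extracts the minimum
-- card value with its suits, instead of A's quadratic accumulate-then-sort; return value only
-- (A reads, never mutates, its argument).

-- ===== PORT A =====
-- A's inner loop over the accumulated distribution: appends card.2 to every entry
-- whose value equals card.1, and reports whether any entry matched (placed_in_dist).
def pvInnerA (card : String × String) : List (String × List String) → List (String × List String) × Bool
  | [] => ([], false)
  | vt :: rest =>
      let r := pvInnerA card rest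
      if vt.1 == card.1 then ((vt.1, vt.2 ++ [card.2]) :: r.1, true)
      else (vt :: r.1, r.2)

-- one iteration of A's outer loop
def pvStepA (dist : List (String × List String)) (card : String × String) : List (String × List String) :=
  if (pvInnerA card dist).2 then (pvInnerA card dist).1
  else (pvInnerA card dist).1 ++ [(card.1, [card.2])]

-- sorted(card_distribution): the entries' first components are pairwise distinct (an entry is
-- only appended when no entry matched), so Python's lexicographic list comparison is exactly
-- comparison of the first components; the key (·.1) is exact here.
def get_card_distribution (hand_cards : List (String × String)) : List (String × List String) :=
  PySem.List.sorted (hand_cards.foldl pvStepA []) (fun p => p.1) false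

-- ===== PORT B =====
-- Source B: if empty return []; v = min of the values; emit (v, suits of v in encounter order);
-- recurse on the cards whose value is not v. min(generator) = PySem.List.min? (some, list nonempty).
def get_card_distribution_alt (hand_cards : List (String × String)) : List (String × List String) :=
  if hand_cards.isEmpty then []
  else
    match hm : PySem.List.min? (hand_cards.map (fun c => c.1)) (fun x => x) with
    | none => []  -- unreachable: hand_cards ≠ []
    | some v =>
        (v, (hand_cards.filter (fun c => c.1 == v)).map (fun c => c.2)) ::
          get_card_distribution_alt (hand_cards.filter (fun c => !(c.1 == v)))
  termination_by hand_cards.length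
  decreasing_by
    simp only [List.length_unattach]
    rw [← List.length_attach (l := hand_cards), List.length_filter_lt_length_iff_exists]
    obtain ⟨c, hc, hcv⟩ := List.mem_map.mp (PySem.List.min?_mem hm)
    exact ⟨⟨c, hc⟩, List.mem_attach _ _, by simp [hcv]⟩

-- ===== PRECONDITION & SPEC =====
def Spec_get_card_distribution (hand_cards : List (String × String)) (out : List (String × List String)) : Prop := out = get_card_distribution_alt hand_cards
instance (hand_cards : List (String × String)) (out : List (String × List String)) : Decidable (Spec_get_card_distribution hand_cards out) := by unfold Spec_get_card_distribution; infer_instance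

-- ===== CLAIM (what is proved, stated in full; the proofs are below) =====
def Claim_equal_get_card_distribution : Prop := ∀ (hand_cards : List (String × String)), Dom_get_card_distribution hand_cards → Spec_get_card_distribution hand_cards (get_card_distribution hand_cards)

-- ===== LEMMAS AND PROOFS =====

-- the suits of value v, in encounter order (shared shape of both characterizations)
def pvSuits (cards : List (String × String)) (v : String) : List String :=
  (cards.filter (fun c => c.1 == v)).map (fun c => c.2)

-- ---- A-side lemmas (A's loop builds exactly the value→suits dict, then sorts it) ----

-- the placed flag is exactly dict containment
lemma pvInnerA_snd (card : String × String) (dist : List (String × List String)) :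
    (pvInnerA card dist).2 = (PySem.Dict.mk dist).contains card.1 := by
  induction dist with
  | nil => simp [pvInnerA, PySem.Dict.contains]
  | cons vt rest ih =>
      simp only [pvInnerA, PySem.Dict.contains, List.any_cons] at *
      by_cases h : vt.1 == card.1 <;> simp [h, ih]

-- no match: the inner pass leaves the distribution unchanged
lemma pvInnerA_fst_of_not_contains (card : String × String) (dist : List (String × List String))
    (h : (PySem.Dict.mk dist).contains card.1 = false) :
    (pvInnerA card dist).1 = dist := by
  induction dist with
  | nil => simp [pvInnerA]
  | cons vt rest ih =>
      simp only [PySem.Dict.contains, List.any_cons, Bool.or_eq_false_iff] at h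
      simp only [pvInnerA, h.1, Bool.false_eq_true, if_false]
      rw [ih]
      simp only [PySem.Dict.contains, h.2]

-- a match, with distinct keys: the inner pass is exactly Dict.insert of (old list ++ [suit])
lemma pvInnerA_fst_of_contains (card : String × String) (dist : List (String × List String))
    (hnd : ((PySem.Dict.mk dist).keys).Nodup)
    (h : (PySem.Dict.mk dist).contains card.1 = true) :
    (pvInnerA card dist).1 =
      ((PySem.Dict.mk dist).insert card.1 ((PySem.Dict.mk dist).getD card.1 [] ++ [card.2])).items := by
  induction dist with
  | nil => simp [PySem.Dict.contains] at h
  | cons vt rest ih =>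
      simp only [PySem.Dict.keys, List.map_cons, List.nodup_cons] at hnd
      by_cases hv : vt.1 == card.1
      · -- head matches; by nodup no entry of rest matches
        have hrest : (PySem.Dict.mk rest).contains card.1 = false := by
          simp only [PySem.Dict.contains]
          rw [List.any_eq_false]
          intro p hp
          simp only [beq_iff_eq] at hv ⊢
          intro hpe
          exact hnd.1 (by rw [hv, ← hpe]; exact List.mem_map_of_mem hp)
        simp only [pvInnerA, if_true, PySem.Dict.insert, h, if_true,
          PySem.Dict.getD, PySem.Dict.get?, List.find?_cons, hv,
          List.map_cons]
        rw [pvInnerA_fst_of_not_contains card rest hrest]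
        simp only [beq_iff_eq] at hv
        refine List.cons_eq_cons.mpr ⟨by rw [hv]; rfl, ?_⟩
        · -- rest unchanged by the replacing map
          symm
          have : ∀ p ∈ rest, (if (p.1 == card.1) = true then (card.1, (Option.map (fun x => x.2) (some vt)).getD [] ++ [card.2]) else p) = p := by
            intro p hp
            have : (p.1 == card.1) = false := by
              rw [beq_eq_false_iff_ne]
              intro hpe
              exact hnd.1 (by rw [hv, ← hpe]; exact List.mem_map_of_mem hp)
            simp [this]
          rw [List.map_congr_left this, List.map_id']
      · -- head does not match
        have hrest : (PySem.Dict.mk rest).contains card.1 = true := by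
          simp only [PySem.Dict.contains, List.any_cons, hv] at h ⊢
          simpa using h
        simp only [pvInnerA, hv, Bool.false_eq_true, if_false]
        rw [ih hnd.2 hrest]
        simp only [PySem.Dict.insert, h, hrest, if_true, PySem.Dict.getD, PySem.Dict.get?,
          List.find?_cons, hv, List.map_cons, Bool.false_eq_true, if_false]

-- one outer-loop step of A equals one dict step (on nodup-key states)
lemma pvStepA_eq_modify (dist : List (String × List String)) (card : String × String)
    (hnd : ((PySem.Dict.mk dist).keys).Nodup) :
    pvStepA dist card = ((PySem.Dict.mk dist).modify card.1 [] (· ++ [card.2])).items := by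
  unfold pvStepA PySem.Dict.modify
  rw [pvInnerA_snd]
  by_cases h : (PySem.Dict.mk dist).contains card.1
  · rw [h, if_pos rfl, pvInnerA_fst_of_contains card dist hnd h]
  · rw [Bool.not_eq_true] at h
    rw [h]
    simp only [Bool.false_eq_true, if_false]
    rw [pvInnerA_fst_of_not_contains card dist h]
    have hg : (PySem.Dict.mk dist).getD card.1 [] = [] := by
      simp only [PySem.Dict.contains] at h
      simp only [PySem.Dict.getD, PySem.Dict.get?]
      rw [List.find?_eq_none.mpr]
      · rfl
      · intro p hp
        have := List.any_eq_false.mp h p hp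
        simpa using this
    rw [PySem.Dict.insert, if_neg (by simp [h]), hg]
    rfl

-- A's whole accumulation equals the dict accumulation
lemma pvFoldlA_eq (l : List (String × String)) (dist : List (String × List String))
    (hnd : ((PySem.Dict.mk dist).keys).Nodup) :
    l.foldl pvStepA dist = (l.foldl (fun d card => d.modify card.1 [] (· ++ [card.2])) (PySem.Dict.mk dist)).items := by
  induction l generalizing dist with
  | nil => simp
  | cons card rest ih =>
      simp only [List.foldl_cons]
      rw [pvStepA_eq_modify dist card hnd]
      exact ih _ (PySem.Dict.nodup_keys_insert (PySem.Dict.mk dist) card.1 _ hnd)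

-- the dict's item list: some Nodup key list K with the values of cards as members, each paired with its suits
lemma pvDictItems_char (cards : List (String × String)) :
    ∃ K : List String, K.Nodup ∧ (∀ v, v ∈ K ↔ v ∈ cards.map (fun c => c.1)) ∧
      (cards.foldl (fun d card => d.modify card.1 [] (· ++ [card.2])) PySem.Dict.empty).items
        = K.map (fun v => (v, pvSuits cards v)) := by
  set D := cards.foldl (fun d card => d.modify card.1 [] (· ++ [card.2])) PySem.Dict.empty with hD
  have hnd : D.keys.Nodup := by
    rw [hD]
    exact PySem.Dict.nodup_keys_foldl_modify_key cards (fun c => c.1) []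
      (fun _ card => (· ++ [card.2])) PySem.Dict.empty (by simp)
  refine ⟨D.keys, hnd, ?_, ?_⟩
  · intro v
    rw [hD]
    rw [PySem.Dict.keys_foldl_modify_key cards (fun c => c.1) [] (fun _ card => (· ++ [card.2]))]
    have := PySem.Set.mem_update (PySem.Dict.empty (κ := String) (ν := List String)).keys (cards.map (fun c => c.1)) v
    simp only [this]
    simp [PySem.Dict.keys_empty]
  · rw [PySem.Dict.items_eq_map_keys D hnd []]
    refine List.map_congr_left (fun k _ => ?_)
    rw [hD, PySem.Dict.getD_foldl_modify_append cards PySem.Dict.empty k]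
    simp [pvSuits]

-- ---- B-side characterization: B's output is the (unique) strictly key-increasing list of
-- (value, suits) pairs over the distinct values of cards ----
lemma pvAlt_char : ∀ (n : Nat) (cards : List (String × String)), cards.length = n →
    ∃ V : List String, V.Nodup ∧ V.Pairwise (· < ·) ∧
      (∀ v, v ∈ V ↔ v ∈ cards.map (fun c => c.1)) ∧
      get_card_distribution_alt cards = V.map (fun v => (v, pvSuits cards v)) := by
  intro n
  induction n using Nat.strong_induction_on with
  | _ n ih =>
    intro cards hlen
    match cards with
    | [] => exact ⟨[], by simp, by simp, by simp, by rw [get_card_distribution_alt.eq_def]; simp⟩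
    | c :: t =>
      obtain ⟨m, hm⟩ : ∃ m, PySem.List.min? ((c :: t).map (fun c => c.1)) (fun x => x) = some m := by
        cases h : PySem.List.min? ((c :: t).map (fun c => c.1)) (fun x => x) with
        | none => simp [PySem.List.min?_eq_none_iff] at h
        | some m => exact ⟨m, rfl⟩
      have hmmem : m ∈ (c :: t).map (fun c => c.1) := PySem.List.min?_mem hm
      have hmmin : ∀ y ∈ (c :: t).map (fun c => c.1), m ≤ y := fun y hy =>
        PySem.List.min?_isMin hm y hy
      set rest := (c :: t).filter (fun c => !(c.1 == m)) with hrest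
      have hlt : rest.length < n := by
        rw [← hlen, hrest, List.length_filter_lt_length_iff_exists]
        obtain ⟨d, hd, hdv⟩ := List.mem_map.mp hmmem
        exact ⟨d, hd, by simp [hdv]⟩
      obtain ⟨V', hnd', hpw', hmem', heq'⟩ := ih rest.length hlt rest rfl
      have hmemrest : ∀ v, v ∈ rest.map (fun c => c.1) ↔ (v ∈ (c :: t).map (fun c => c.1) ∧ v ≠ m) := by
        intro v
        simp only [hrest, List.mem_map, List.mem_filter]
        constructor
        · rintro ⟨d, ⟨hd, hdm⟩, rfl⟩
          exact ⟨⟨d, hd, rfl⟩, by simpa using hdm⟩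
        · rintro ⟨⟨d, hd, rfl⟩, hvm⟩
          exact ⟨d, ⟨hd, by simpa using hvm⟩, rfl⟩
      have hV'ne : ∀ v ∈ V', v ≠ m := fun v hv =>
        ((hmemrest v).mp ((hmem' v).mp hv)).2
      refine ⟨m :: V', ?_, ?_, ?_, ?_⟩
      · exact List.nodup_cons.mpr ⟨fun hmV' => hV'ne m hmV' rfl, hnd'⟩
      · refine List.pairwise_cons.mpr ⟨fun v hv => ?_, hpw'⟩
        have hvmem := ((hmemrest v).mp ((hmem' v).mp hv)).1
        exact lt_of_le_of_ne (hmmin v hvmem) (Ne.symm (hV'ne v hv))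
      · intro v
        simp only [List.mem_cons]
        constructor
        · rintro (rfl | hv)
          · exact hmmem
          · exact ((hmemrest v).mp ((hmem' v).mp hv)).1
        · intro hv
          by_cases hvm : v = m
          · exact Or.inl hvm
          · exact Or.inr ((hmem' v).mpr ((hmemrest v).mpr ⟨hv, hvm⟩))
      · rw [get_card_distribution_alt.eq_def]
        simp only [List.isEmpty_cons, Bool.false_eq_true, if_false]
        rw [hm]
        simp only [List.map_cons]
        refine List.cons_eq_cons.mpr ⟨rfl, ?_⟩
        rw [← hrest, heq']
        refine List.map_congr_left (fun v hv => ?_)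
        have hvm := hV'ne v hv
        simp only [Prod.mk.injEq, true_and]
        -- suits of v in rest = suits of v in cards, since v ≠ m
        rw [pvSuits, pvSuits, hrest, List.filter_filter]
        congr 1
        refine List.filter_congr (fun d _ => ?_)
        by_cases hd : d.1 = v
        · simp [hd, hvm]
        · simp [hd]

-- ===== VERDICT (by name: the statement is the Claim_ definition above) =====
theorem get_card_distribution_spec : Claim_equal_get_card_distribution := by
  intro hand_cards _
  show PySem.List.sorted (hand_cards.foldl pvStepA []) (fun p => p.1) false =
    get_card_distribution_alt hand_cards
  rw [pvFoldlA_eq hand_cards [] (by simp [PySem.Dict.keys])]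
  rw [show (PySem.Dict.mk ([] : List (String × List String))) = PySem.Dict.empty from rfl]
  obtain ⟨K, hKnd, hKmem, hKeq⟩ := pvDictItems_char hand_cards
  obtain ⟨V, hVnd, hVpw, hVmem, hVeq⟩ := pvAlt_char hand_cards.length hand_cards rfl
  have hperm : V.Perm K := (List.perm_ext_iff_of_nodup hVnd hKnd).mpr
    (fun v => (hVmem v).trans (hKmem v).symm)
  rw [hKeq, hVeq]
  exact PySem.List.sorted_eq_of_perm_of_pairwise_lt
    (K.map (fun v => (v, pvSuits hand_cards v)))
    (V.map (fun v => (v, pvSuits hand_cards v)))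
    (fun p => p.1)
    (hperm.map (fun v => (v, pvSuits hand_cards v)))
    (by rw [List.pairwise_map]; exact hVpw)
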